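-- pv_equiv track=rewrite | github.com/alejandra74/IRIS | Matrix_generator.py | matrix_generator
-- ===== SOURCE A (Python) =====
-- def matrix_generator(x,y,e,d):
--     # create matrix that save coord points of countor that match each body part
--     matrix_x = [[] for _ in range(len(x))]
--     matrix_y = [[] for _ in range(len(y))]
--     for i in range(len(y)):
--         for j in range(len(e)):
--             if y[i] == e[j] or y[i] + 1 == e[j] or y[i] - 1 == e[j]:
--                 matrix_y[i].append(e[j])
--                 matrix_x[i].append(d[j])
--     # create matrix with elements from matrix_x and matrix_y
--     matrix = [[] for _ in range(len(matrix_x))]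
--     for i in range(len(matrix_x)):
--         for j in range(len(matrix_x[i])):
--             matrix[i].append((matrix_x[i][j], matrix_y[i][j]))
--
--     return matrix, matrix_x, matrix_y
-- ===== SOURCE B (Python) =====
-- def matrix_generator(x, y, e, d):
--     # Bucket e-values -> sorted index lists once, then gather per y-value instead of rescanning e per y[i].
--     buckets = {}
--     for j, v in enumerate(e):
--         buckets.setdefault(v, []).append(j)
--     rows = [sorted(buckets.get(v - 1, []) + buckets.get(v, []) + buckets.get(v + 1, []))
--             for v in y]
--     matrix_y = [[e[j] for j in js] for js in rows]
--     rows_x = [[d[j] for j in js] for js in rows]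
--     matrix_x = [rows_x[i] if i < len(rows_x) else [] for i in range(len(x))]
--     matrix = [list(zip(matrix_x[i], matrix_y[i])) if i < len(matrix_y) else []
--               for i in range(len(x))]
--     return matrix, matrix_x, matrix_y
-- ===== Notes on version B (the rewrite author's own statement) =====
-- stated objective: alternative
-- what changed: Instead of A's nested scan of e for every y[i], B buckets the indices of e by value in one dict pass and, per y[i], concatenates the three buckets y[i]-1, y[i], y[i]+1 and sorts them by index, building the pair matrix by zipping the derived rows; intended as faster on sparse matches, but a timing run's match-dense inputs (output itself quadratic) measured only 1.22x at n=1024, so no speed is claimed.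
import Mathlib
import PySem

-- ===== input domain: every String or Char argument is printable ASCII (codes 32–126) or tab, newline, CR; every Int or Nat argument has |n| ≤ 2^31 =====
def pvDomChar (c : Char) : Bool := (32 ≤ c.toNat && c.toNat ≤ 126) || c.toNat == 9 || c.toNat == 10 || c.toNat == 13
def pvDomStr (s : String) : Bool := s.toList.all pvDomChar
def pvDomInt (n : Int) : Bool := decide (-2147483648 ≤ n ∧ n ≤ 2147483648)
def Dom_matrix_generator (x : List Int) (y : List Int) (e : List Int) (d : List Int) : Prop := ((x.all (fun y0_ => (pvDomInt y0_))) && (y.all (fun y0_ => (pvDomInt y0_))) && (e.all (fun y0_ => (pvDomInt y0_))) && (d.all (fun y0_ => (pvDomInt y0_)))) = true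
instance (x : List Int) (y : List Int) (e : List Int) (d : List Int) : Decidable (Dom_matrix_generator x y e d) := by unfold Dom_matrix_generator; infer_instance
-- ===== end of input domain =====

-- B replaces A's nested scan of e per y[i] by a one-pass value→indices bucket dict, merging the
-- three buckets y[i]-1, y[i], y[i]+1 per row (objective: alternative algorithm; a timing run
-- measured no speed-up on its match-dense inputs, so none is claimed).

-- ===== PORT A =====
-- Python A, step for step.  List indexing y[i]/e[j]/d[j] is ported with pyGetD (default never
-- reached: loop indices are in range, and the accesses that would raise in Python — matrix_x[i]
-- with i ≥ len(x), d[j] with j ≥ len(d) — are excluded by Pre_; List.modify is likewise a no-op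
-- exactly where Python's matrix_x[i].append would raise).
def matrix_generator (x : List Int) (y : List Int) (e : List Int) (d : List Int) : (List (List (Int × Int))) × List (List Int) × List (List Int) :=
  -- matrix_x = [[] for _ in range(len(x))]; matrix_y = [[] for _ in range(len(y))]
  let mx0 : List (List Int) := (PySem.List.pyRange 0 (PySem.List.len x)).map (fun _ => [])
  let my0 : List (List Int) := (PySem.List.pyRange 0 (PySem.List.len y)).map (fun _ => [])
  -- for i in range(len(y)): for j in range(len(e)): if match: append to matrix_y[i], matrix_x[i]
  let p1 := (PySem.List.pyRange 0 (PySem.List.len y)).foldl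
    (fun (st : List (List Int) × List (List Int)) i =>
      (PySem.List.pyRange 0 (PySem.List.len e)).foldl
        (fun st j =>
          if PySem.List.pyGetD y i 0 = PySem.List.pyGetD e j 0 ∨
             PySem.List.pyGetD y i 0 + 1 = PySem.List.pyGetD e j 0 ∨
             PySem.List.pyGetD y i 0 - 1 = PySem.List.pyGetD e j 0 then
            (st.1.modify i.toNat (· ++ [PySem.List.pyGetD d j 0]),
             st.2.modify i.toNat (· ++ [PySem.List.pyGetD e j 0]))
          else st) st)
    (mx0, my0)
  let mx := p1.1
  let my := p1.2
  -- matrix = [[] for _ in range(len(matrix_x))]; then append pairs (matrix_x[i][j], matrix_y[i][j])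
  let m0 : List (List (Int × Int)) := (PySem.List.pyRange 0 (PySem.List.len mx)).map (fun _ => [])
  let matrix := (PySem.List.pyRange 0 (PySem.List.len mx)).foldl
    (fun m i =>
      (PySem.List.pyRange 0 (PySem.List.len (PySem.List.pyGetD mx i []))).foldl
        (fun m j =>
          m.modify i.toNat (· ++ [(PySem.List.pyGetD (PySem.List.pyGetD mx i []) j 0,
                                   PySem.List.pyGetD (PySem.List.pyGetD my i []) j 0)])) m)
    m0
  (matrix, mx, my)

-- ===== PORT B =====
-- Source B, step for step (buckets.setdefault(v, []).append(j) = Dict.modify v [] (· ++ [j]);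
-- e[j]/d[j] again via pyGetD, the raising d[j] accesses being excluded by Pre_).
def matrix_generator_alt (x : List Int) (y : List Int) (e : List Int) (d : List Int) : (List (List (Int × Int))) × List (List Int) × List (List Int) :=
  let buckets : PySem.Dict Int (List Int) :=
    (PySem.List.enumerate e).foldl (fun b p => b.modify p.2 [] (· ++ [p.1])) PySem.Dict.empty
  let rows : List (List Int) := y.map (fun v =>
    PySem.List.sorted (buckets.getD (v - 1) [] ++ buckets.getD v [] ++ buckets.getD (v + 1) [])
      (fun j => j))
  let matrix_y := rows.map (fun js => js.map (fun j => PySem.List.pyGetD e j 0))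
  let rows_x := rows.map (fun js => js.map (fun j => PySem.List.pyGetD d j 0))
  let matrix_x := (PySem.List.pyRange 0 (PySem.List.len x)).map
    (fun i => if i < PySem.List.len rows_x then PySem.List.pyGetD rows_x i [] else [])
  let matrix := (PySem.List.pyRange 0 (PySem.List.len x)).map
    (fun i => if i < PySem.List.len matrix_y then
        (PySem.List.pyGetD matrix_x i []).zip (PySem.List.pyGetD matrix_y i []) else [])
  (matrix, matrix_x, matrix_y)

-- ===== PRECONDITION & SPEC =====
-- Pre_ excludes exactly the inputs where Python A raises IndexError: a y/e match whose row i is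
-- ≥ len(x) (matrix_x[i].append) or whose column j is ≥ len(d) (d[j]).
def Pre_matrix_generator (x : List Int) (y : List Int) (e : List Int) (d : List Int) : Prop :=
  ∀ i < y.length, ∀ j < e.length,
    (y.getD i 0 = e.getD j 0 ∨ y.getD i 0 + 1 = e.getD j 0 ∨ y.getD i 0 - 1 = e.getD j 0) →
    i < x.length ∧ j < d.length
instance (x : List Int) (y : List Int) (e : List Int) (d : List Int) : Decidable (Pre_matrix_generator x y e d) := by unfold Pre_matrix_generator; infer_instance
def pvWitness_matrix_generator : List Int × List Int × List Int × List Int := ([7, 9], [3, 5], [4, 9], [10, 20])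

def Spec_matrix_generator (x : List Int) (y : List Int) (e : List Int) (d : List Int) (out : (List (List (Int × Int))) × List (List Int) × List (List Int)) : Prop := out = matrix_generator_alt x y e d
instance (x : List Int) (y : List Int) (e : List Int) (d : List Int) (out : (List (List (Int × Int))) × List (List Int) × List (List Int)) : Decidable (Spec_matrix_generator x y e d out) := by unfold Spec_matrix_generator; infer_instance

-- ===== CLAIM (what is proved, stated in full; the proofs are below) =====
def Claim_equal_matrix_generator : Prop := ∀ (x : List Int) (y : List Int) (e : List Int) (d : List Int), Dom_matrix_generator x y e d → Pre_matrix_generator x y e d → Spec_matrix_generator x y e d (matrix_generator x y e d)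

-- ===== LEMMAS AND PROOFS =====

-- the matched index list (as Ints, increasing) of one row value v
def pvMatched (e : List Int) (v : Int) : List Int :=
  (PySem.List.pyRange 0 (PySem.List.len e)).filter
    (fun j => decide (v = PySem.List.pyGetD e j 0 ∨ v + 1 = PySem.List.pyGetD e j 0 ∨
                      v - 1 = PySem.List.pyGetD e j 0))

-- row k of the x-matrix / y-matrix both programs compute
def pvGX (y e d : List Int) (i : Nat) : List Int :=
  (pvMatched e (y.getD i 0)).map (fun j => PySem.List.pyGetD d j 0)
def pvGY (y e : List Int) (i : Nat) : List Int :=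
  (pvMatched e (y.getD i 0)).map (fun j => PySem.List.pyGetD e j 0)

theorem pv_modify_map_range {β : Type} (m : Nat) (f : Nat → List β) (t : Nat) (l : List β) :
    ((List.range m).map f).modify t (· ++ l)
      = (List.range m).map (fun k => if k = t then f k ++ l else f k) := by
  apply List.ext_getElem
  · simp
  · intro i h1 h2
    simp [List.getElem_modify]
    by_cases h : t = i <;> simp [h]
    · intro h'; exact absurd h' (by omega)

theorem pv_foldl_modify_append {α β : Type} (l : List α) (g : α → β) (t : Nat)
    (m0 : List (List β)) :
    l.foldl (fun m j => m.modify t (· ++ [g j])) m0 = m0.modify t (· ++ l.map g) := by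
  induction l generalizing m0 with
  | nil =>
    simp
    apply List.ext_getElem
    · simp
    · intro i h1 h2; simp [List.getElem_modify]
  | cons a tl ih =>
    simp only [List.foldl_cons, ih]
    apply List.ext_getElem
    · simp
    · intro i h1 h2
      simp [List.getElem_modify]
      by_cases h : t = i <;> simp [h]

theorem pv_foldl_range_modify {β : Type} (N m : Nat) (g : Nat → List β) :
    (List.range N).foldl (fun acc i => acc.modify i (· ++ g i))
        ((List.range m).map (fun _ => []))
      = (List.range m).map (fun k => if k < N then g k else []) := by
  induction N with
  | zero => simp
  | succ n ih =>
    rw [List.range_succ, List.foldl_append, ih]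
    simp only [List.foldl_cons, List.foldl_nil]
    rw [pv_modify_map_range]
    apply List.map_congr_left
    intro k hk
    by_cases h : k = n
    · subst h; simp
    · by_cases h2 : k < n <;> simp [h, h2] <;> omega

theorem pv_inner {β : Type} (l : List β) (fx fy : β → Int) (t : Nat)
    (st : List (List Int) × List (List Int)) :
    l.foldl (fun st j => (st.1.modify t (· ++ [fx j]), st.2.modify t (· ++ [fy j]))) st
      = (st.1.modify t (· ++ l.map fx), st.2.modify t (· ++ l.map fy)) := by
  obtain ⟨s1, s2⟩ := st
  rw [PySem.List.foldl_prod_mk (f := fun m j => List.modify m t (· ++ [fx j]))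
        (g := fun m j => List.modify m t (· ++ [fy j])),
      pv_foldl_modify_append, pv_foldl_modify_append]

theorem pv_foldl_range_modify2 (N mx my : Nat) (gx gy : Nat → List Int) :
    (List.range N).foldl
        (fun (st : List (List Int) × List (List Int)) i =>
          (st.1.modify i (· ++ gx i), st.2.modify i (· ++ gy i)))
        ((List.range mx).map (fun _ => []), (List.range my).map (fun _ => []))
      = ((List.range mx).map (fun k => if k < N then gx k else []),
         (List.range my).map (fun k => if k < N then gy k else [])) := by
  rw [PySem.List.foldl_prod_mk (f := fun m i => List.modify m i (· ++ gx i))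
        (g := fun m i => List.modify m i (· ++ gy i)),
      pv_foldl_range_modify, pv_foldl_range_modify]

-- phase-1 of port A, characterized

theorem pv_phase1 (x y e d : List Int) :
    (PySem.List.pyRange 0 (PySem.List.len y)).foldl
      (fun (st : List (List Int) × List (List Int)) i =>
        (PySem.List.pyRange 0 (PySem.List.len e)).foldl
          (fun st j =>
            if PySem.List.pyGetD y i 0 = PySem.List.pyGetD e j 0 ∨
               PySem.List.pyGetD y i 0 + 1 = PySem.List.pyGetD e j 0 ∨
               PySem.List.pyGetD y i 0 - 1 = PySem.List.pyGetD e j 0 then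
              (st.1.modify i.toNat (· ++ [PySem.List.pyGetD d j 0]),
               st.2.modify i.toNat (· ++ [PySem.List.pyGetD e j 0]))
            else st) st)
      ((PySem.List.pyRange 0 (PySem.List.len x)).map (fun _ => []),
       (PySem.List.pyRange 0 (PySem.List.len y)).map (fun _ => []))
    = ((List.range x.length).map (fun k => if k < y.length then pvGX y e d k else []),
       (List.range y.length).map (fun k => pvGY y e k)) := by
  have hx : PySem.List.len x = ((x.length : Nat) : Int) := rfl
  have hy : PySem.List.len y = ((y.length : Nat) : Int) := rfl
  rw [hx, hy, PySem.List.pyRange_zero_natCast, PySem.List.pyRange_zero_natCast,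
      List.foldl_map, List.map_map, List.map_map]
  simp only [PySem.List.pyGetD_natCast, Int.toNat_natCast]
  simp only [PySem.List.foldl_ite_eq_foldl_filter]
  simp only [pv_inner]
  show (List.range y.length).foldl
      (fun (st : List (List Int) × List (List Int)) i =>
        (st.1.modify i (· ++ pvGX y e d i), st.2.modify i (· ++ pvGY y e i)))
      ((List.range x.length).map (fun _ => []), (List.range y.length).map (fun _ => []))
    = ((List.range x.length).map (fun k => if k < y.length then pvGX y e d k else []),
       (List.range y.length).map (fun k => pvGY y e k))
  rw [pv_foldl_range_modify2]
  refine Prod.ext rfl ?_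
  apply List.map_congr_left
  intro k hk
  simp [List.mem_range.mp hk]

-- phase-2 of port A (building `matrix`), characterized for arbitrary row matrices

theorem pv_phase2 (mx my : List (List Int)) :
    (PySem.List.pyRange 0 (PySem.List.len mx)).foldl
      (fun m i =>
        (PySem.List.pyRange 0 (PySem.List.len (PySem.List.pyGetD mx i []))).foldl
          (fun m j =>
            m.modify i.toNat (· ++ [(PySem.List.pyGetD (PySem.List.pyGetD mx i []) j 0,
                                     PySem.List.pyGetD (PySem.List.pyGetD my i []) j 0)])) m)
      ((PySem.List.pyRange 0 (PySem.List.len mx)).map (fun _ => []))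
    = (List.range mx.length).map (fun k =>
        (PySem.List.pyRange 0 (PySem.List.len (mx.getD k []))).map
          (fun j => (PySem.List.pyGetD (mx.getD k []) j 0, PySem.List.pyGetD (my.getD k []) j 0))) := by
  rw [show PySem.List.len mx = ((mx.length : Nat) : Int) from rfl,
      PySem.List.pyRange_zero_natCast, List.foldl_map, List.map_map]
  simp only [PySem.List.pyGetD_natCast, Int.toNat_natCast]
  simp only [pv_foldl_modify_append]
  rw [show (List.map ((fun (_ : Int) => ([] : List (Int × Int))) ∘ fun (k : Nat) => (↑k : Int)) (List.range mx.length)) = (List.range mx.length).map (fun _ => []) from rfl]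
  rw [pv_foldl_range_modify]
  apply List.map_congr_left
  intro k hk
  simp [List.mem_range.mp hk]

theorem pv_map_pyRange_zip (r1 r2 : List Int) (h : r1.length = r2.length) :
    (PySem.List.pyRange 0 (PySem.List.len r1)).map
      (fun j => (PySem.List.pyGetD r1 j 0, PySem.List.pyGetD r2 j 0)) = r1.zip r2 := by
  rw [show PySem.List.len r1 = ((r1.length : Nat) : Int) from rfl,
      PySem.List.pyRange_zero_natCast, List.map_map]
  apply List.ext_getElem
  · simp [h]
  · intro i h1 h2
    simp only [List.getElem_map, List.getElem_range, Function.comp_apply,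
      PySem.List.pyGetD_natCast, List.getElem_zip]
    have hi : i < r1.length := by simpa using h1
    rw [List.getD_eq_getElem _ _ hi, List.getD_eq_getElem _ _ (h ▸ hi)]

theorem pv_A_eq (x y e d : List Int) :
    matrix_generator x y e d
      = ((List.range x.length).map (fun k =>
            if k < y.length then (pvGX y e d k).zip (pvGY y e k) else []),
         (List.range x.length).map (fun k => if k < y.length then pvGX y e d k else []),
         (List.range y.length).map (fun k => pvGY y e k)) := by
  unfold matrix_generator
  simp only []
  rw [pv_phase1]
  rw [pv_phase2]
  simp only [List.length_map, List.length_range]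
  refine Prod.ext ?_ rfl
  apply List.map_congr_left
  intro k hk
  have hkx : k < x.length := List.mem_range.mp hk
  by_cases hky : k < y.length
  · rw [PySem.List.getD_map_range _ _ _ _ hkx, PySem.List.getD_map_range _ _ _ _ hky]
    simp only [hky, if_pos]
    rw [pv_map_pyRange_zip]
    · simp [pvGX, pvGY]
  · rw [PySem.List.getD_map_range _ _ _ _ hkx]
    simp only [hky, if_neg, not_false_iff]
    rw [List.getD_eq_default _ _ (by simpa using Nat.le_of_not_lt hky)]
    simp [PySem.List.pyRange, PySem.List.len]

theorem pv_map_getD_range {α β : Type} (l : List α) (dflt : α) (F : α → β) :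
    (List.range l.length).map (fun i => F (l.getD i dflt)) = l.map F := by
  apply List.ext_getElem
  · simp
  · intro i h1 h2
    simp only [List.getElem_map, List.getElem_range]
    rw [List.getD_eq_getElem _ _ (by simpa using h1)]

theorem pv_getD_map {α : Type} (l : List α) (dflt : α) (G : α → List Int) (k : Nat)
    (hk : k < l.length) : (l.map G).getD k [] = G (l.getD k dflt) := by
  rw [List.getD_eq_getElem _ _ (by simpa using hk), List.getElem_map,
      List.getD_eq_getElem _ _ hk]

theorem pv_perm_filter_or {α : Type} (l : List α) (p q : α → Bool)
    (h : ∀ a, ¬(p a = true ∧ q a = true)) :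
    (l.filter p ++ l.filter q).Perm (l.filter (fun a => p a || q a)) := by
  induction l with
  | nil => simp
  | cons a tl ih =>
    simp only [List.filter_cons]
    by_cases hp : p a = true
    · have hq : ¬ q a = true := fun hq => h a ⟨hp, hq⟩
      simp [hp, hq]
      exact ih
    · by_cases hq : q a = true
      · simp [hp, hq]
        exact List.perm_middle.trans (ih.cons a)
      · simp [hp, hq]
        exact ih

theorem pv_filter_or3_perm (l : List Int) (e : List Int) (v : Int) :
    (l.filter (fun j => PySem.List.pyGetD e j 0 == v - 1)
      ++ l.filter (fun j => PySem.List.pyGetD e j 0 == v)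
      ++ l.filter (fun j => PySem.List.pyGetD e j 0 == v + 1)).Perm
    (l.filter (fun j => decide (v = PySem.List.pyGetD e j 0 ∨ v + 1 = PySem.List.pyGetD e j 0 ∨
                                 v - 1 = PySem.List.pyGetD e j 0))) := by
  have h12 := pv_perm_filter_or l (fun j => PySem.List.pyGetD e j 0 == v - 1)
      (fun j => PySem.List.pyGetD e j 0 == v) (by intro a; simp; omega)
  have h123 := pv_perm_filter_or l
      (fun j => (PySem.List.pyGetD e j 0 == v - 1) || (PySem.List.pyGetD e j 0 == v))
      (fun j => PySem.List.pyGetD e j 0 == v + 1) (by intro a; simp; omega)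
  have heq : (l.filter (fun j => ((PySem.List.pyGetD e j 0 == v - 1) || (PySem.List.pyGetD e j 0 == v)) || (PySem.List.pyGetD e j 0 == v + 1)))
      = (l.filter (fun j => decide (v = PySem.List.pyGetD e j 0 ∨ v + 1 = PySem.List.pyGetD e j 0 ∨
                                 v - 1 = PySem.List.pyGetD e j 0))) := by
    apply List.filter_congr; intro a _; rw [Bool.eq_iff_iff]; simp; omega
  exact ((h12.append (List.Perm.refl _)).trans (heq ▸ h123))

theorem pv_buckets_getD (e : List Int) (c : Int) :
    ((PySem.List.enumerate e).foldl (fun b p => b.modify p.2 [] (· ++ [p.1]))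
        (PySem.Dict.empty : PySem.Dict Int (List Int))).getD c []
      = (PySem.List.pyRange 0 (PySem.List.len e)).filter
          (fun j => PySem.List.pyGetD e j 0 == c) := by
  have hswap : (PySem.List.enumerate e).foldl (fun b p => b.modify p.2 [] (· ++ [p.1]))
        (PySem.Dict.empty : PySem.Dict Int (List Int))
      = ((PySem.List.enumerate e).map Prod.swap).foldl
          (fun b p => b.modify p.1 [] (· ++ [p.2])) PySem.Dict.empty := by
    rw [List.foldl_map]; rfl
  rw [hswap, PySem.Dict.getD_foldl_modify_append]
  rw [PySem.List.enumerate_eq_map_pyRange e 0]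
  rw [List.map_map, List.filter_map, List.map_map]
  simp [Function.comp_def, PySem.Dict.empty, PySem.Dict.getD, PySem.Dict.get?]

theorem pv_pyRange_len_pairwise {α : Type} (e : List α) :
    (PySem.List.pyRange 0 (PySem.List.len e)).Pairwise (fun a b => a < b) := by
  rw [show PySem.List.len e = ((e.length : Nat) : Int) from rfl, PySem.List.pyRange_zero_natCast]
  exact List.pairwise_lt_range.map (f := fun k : Nat => (k : Int))
    (by intro a b hab; simpa using hab)

theorem pv_row_eq (e : List Int) (v : Int) :
    PySem.List.sorted
      (((PySem.List.enumerate e).foldl (fun b p => b.modify p.2 [] (· ++ [p.1]))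
          (PySem.Dict.empty : PySem.Dict Int (List Int))).getD (v - 1) []
        ++ ((PySem.List.enumerate e).foldl (fun b p => b.modify p.2 [] (· ++ [p.1]))
          (PySem.Dict.empty : PySem.Dict Int (List Int))).getD v []
        ++ ((PySem.List.enumerate e).foldl (fun b p => b.modify p.2 [] (· ++ [p.1]))
          (PySem.Dict.empty : PySem.Dict Int (List Int))).getD (v + 1) [])
      (fun j => j)
      = pvMatched e v := by
  rw [pv_buckets_getD, pv_buckets_getD, pv_buckets_getD]
  apply PySem.List.sorted_eq_of_perm_of_pairwise_lt
  · exact (pv_filter_or3_perm _ e v).symm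
  · exact (pv_pyRange_len_pairwise e).filter _

theorem pv_B_eq (x y e d : List Int) :
    matrix_generator_alt x y e d
      = ((List.range x.length).map (fun k =>
            if k < y.length then (pvGX y e d k).zip (pvGY y e k) else []),
         (List.range x.length).map (fun k => if k < y.length then pvGX y e d k else []),
         (List.range y.length).map (fun k => pvGY y e k)) := by
  unfold matrix_generator_alt
  simp only []
  rw [show (y.map (fun v =>
    PySem.List.sorted (((PySem.List.enumerate e).foldl (fun b p => b.modify p.2 [] (· ++ [p.1])) PySem.Dict.empty).getD (v - 1) []
      ++ ((PySem.List.enumerate e).foldl (fun b p => b.modify p.2 [] (· ++ [p.1])) PySem.Dict.empty).getD v []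
      ++ ((PySem.List.enumerate e).foldl (fun b p => b.modify p.2 [] (· ++ [p.1])) PySem.Dict.empty).getD (v + 1) [])
      (fun j => j))) = y.map (fun v => pvMatched e v) from
    List.map_congr_left (fun v _ => pv_row_eq e v)]
  rw [List.map_map, List.map_map]
  rw [show PySem.List.len x = ((x.length : Nat) : Int) from rfl, PySem.List.pyRange_zero_natCast,
      List.map_map, List.map_map]
  refine Prod.ext ?_ (Prod.ext ?_ ?_)
  · apply List.map_congr_left
    intro k hk
    have hkx : k < x.length := List.mem_range.mp hk
    simp only [Function.comp_apply, PySem.List.pyGetD_natCast]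
    rw [show PySem.List.len (y.map ((fun js => js.map (fun j => PySem.List.pyGetD e j 0)) ∘ fun v => pvMatched e v)) = ((y.length : Nat) : Int) by simp [PySem.List.len]]
    by_cases hky : k < y.length
    · rw [if_pos (by exact_mod_cast hky), if_pos hky]
      -- matrix_x element
      rw [PySem.List.getD_map_range _ _ _ _ hkx]
      simp only [Function.comp_apply, PySem.List.pyGetD_natCast]
      rw [show PySem.List.len (y.map ((fun js => js.map (fun j => PySem.List.pyGetD d j 0)) ∘ fun v => pvMatched e v)) = ((y.length : Nat) : Int) by simp [PySem.List.len]]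
      rw [if_pos (by exact_mod_cast hky)]
      rw [pv_getD_map y 0 _ k hky, pv_getD_map y 0 _ k hky]
      rfl
    · rw [if_neg (by simpa using hky), if_neg hky]
  · apply List.map_congr_left
    intro k hk
    have hkx : k < x.length := List.mem_range.mp hk
    simp only [Function.comp_apply, PySem.List.pyGetD_natCast]
    rw [show PySem.List.len (y.map ((fun js => js.map (fun j => PySem.List.pyGetD d j 0)) ∘ fun v => pvMatched e v)) = ((y.length : Nat) : Int) by simp [PySem.List.len]]
    by_cases hky : k < y.length
    · rw [if_pos (by exact_mod_cast hky), if_pos hky]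
      rw [pv_getD_map y 0 _ k hky]
      rfl
    · rw [if_neg (by simpa using hky), if_neg hky]
  · rw [← pv_map_getD_range y 0 ((fun js => js.map (fun j => PySem.List.pyGetD e j 0)) ∘ (fun v => pvMatched e v))]
    rfl

-- ===== VERDICT (by name: the statement is the Claim_ definition above) =====
theorem matrix_generator_spec : Claim_equal_matrix_generator := by
  intro x y e d _ _
  unfold Spec_matrix_generator
  rw [pv_A_eq, pv_B_eq]
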